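-- pv_equiv track=rewrite | github.com/precious0612/sonar_demo | py-app/app.py | bad_logic
-- ===== SOURCE A (Python) =====
-- def bad_logic(x: int) -> int:
--     # 故意：复杂控制流 + 冗余分支，提高认知复杂度（常见 code smell） [oai_citation:3‡GitHub](https://github.com/SonarSource/sonar-python/blob/master/python-checks/src/main/resources/org/sonar/l10n/py/rules/python/S3776.html?utm_source=chatgpt.com)
--     total = 0
--     for i in range(50):
--         if i % 2 == 0:
--             if x > 0:
--                 total += i
--             else:
--                 total -= i
--         else:
--             if x > 10:
--                 total += i * 2
--             elif x > 5:
--                 total += i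
--             elif x > 0:
--                 total -= i
--             else:
--                 total += 1
--     return total
-- ===== SOURCE B (Python) =====
-- def bad_logic(x: int) -> int:
--     # Closed form: split the 50 iterations by parity.
--     # Even i in 0..48: sum = 600, added if x>0 else subtracted.
--     # Odd i in 1..49: sum = 625, 25 values.
--     even_part = 600 if x > 0 else -600
--     if x > 10:
--         odd_part = 1250
--     elif x > 5:
--         odd_part = 625
--     elif x > 0:
--         odd_part = -625
--     else:
--         odd_part = 25
--     return even_part + odd_part
-- ===== Notes on version B (the rewrite author's own statement) =====
-- stated objective: simpler
-- what changed: Replaced the fixed-count branchy loop with a closed-form computation: parity splits the accumulated sum into a constant even part (+/-600) and an odd part chosen by the x-threshold chain (1250/625/-625/25).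
import Mathlib
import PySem

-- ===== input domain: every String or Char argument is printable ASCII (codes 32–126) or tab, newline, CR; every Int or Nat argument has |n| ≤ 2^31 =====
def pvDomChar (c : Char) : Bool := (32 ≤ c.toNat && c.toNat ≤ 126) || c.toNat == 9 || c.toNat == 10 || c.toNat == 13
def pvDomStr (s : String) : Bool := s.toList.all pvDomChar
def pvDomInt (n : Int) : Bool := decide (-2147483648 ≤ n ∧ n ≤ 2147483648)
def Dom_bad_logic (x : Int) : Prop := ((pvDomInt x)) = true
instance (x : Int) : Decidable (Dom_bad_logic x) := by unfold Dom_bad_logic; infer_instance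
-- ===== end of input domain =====

-- B replaces A's fixed-count branchy loop with a closed-form parity/threshold computation (simpler).

-- ===== PORT A =====
def bad_logic (x : Int) : Int :=
  (PySem.List.pyRange 0 50 1).foldl (fun total i =>
    if i % 2 == 0 then
      if x > 0 then total + i else total - i
    else
      if x > 10 then total + i * 2
      else if x > 5 then total + i
      else if x > 0 then total - i
      else total + 1) 0

-- ===== PORT B =====
def bad_logic_alt (x : Int) : Int :=
  let even_part : Int := if x > 0 then 600 else -600
  let odd_part : Int :=
    if x > 10 then 1250
    else if x > 5 then 625
    else if x > 0 then -625
    else 25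
  even_part + odd_part

-- ===== PRECONDITION & SPEC =====
def Spec_bad_logic (x : Int) (out : Int) : Prop := out = bad_logic_alt x
instance (x : Int) (out : Int) : Decidable (Spec_bad_logic x out) := by unfold Spec_bad_logic; infer_instance

-- ===== CLAIM (what is proved, stated in full; the proofs are below) =====
def Claim_equal_bad_logic : Prop := ∀ (x : Int), Dom_bad_logic x → Spec_bad_logic x (bad_logic x)

-- ===== LEMMAS AND PROOFS =====

-- ===== VERDICT (by name: the statement is the Claim_ definition above) =====
theorem bad_logic_spec : Claim_equal_bad_logic := by
  intro x _
  unfold Spec_bad_logic bad_logic bad_logic_alt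
  by_cases h10 : x > 10 <;> by_cases h5 : x > 5 <;> by_cases h0 : x > 0 <;>
    simp [PySem.List.pyRange, List.range_succ, h10, h5, h0, List.foldl]
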